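-- pv_equiv track=rewrite | github.com/M1nseoPark/CodingtestStudy | 최고의 집합.py | solution
-- ===== SOURCE A (Python) =====
-- def solution(n, s):
--     if n > s == 0:
--         answer = [-1]
--
--     else:
--         div = s // n
--         mod = s % n
--         answer = [div] * n
--
--         for i in range(mod):
--             answer[i] += 1
--
--         answer.sort()
--
--     return answer
-- ===== SOURCE B (Python) =====
-- def solution(n, s):
--     # Greedy re-split: instead of div/mod + increments + sort, take a fresh
--     # floor-quotient of the remaining sum each step; values come out ascending.
--     if n > s == 0:
--         return [-1]
--     answer = []
--     rem_sum, rem_cnt = s, n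
--     for _ in range(n):
--         val = rem_sum // rem_cnt
--         answer.append(val)
--         rem_sum -= val
--         rem_cnt -= 1
--     return answer
-- ===== Notes on version B (the rewrite author's own statement) =====
-- stated objective: alternative
-- what changed: Replaces the div/mod closed form with per-element increments and a final sort by a single greedy loop that takes a fresh floor-quotient of the remaining sum each step, producing the values already in ascending order (no sort, no in-place increments).
import Mathlib
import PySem

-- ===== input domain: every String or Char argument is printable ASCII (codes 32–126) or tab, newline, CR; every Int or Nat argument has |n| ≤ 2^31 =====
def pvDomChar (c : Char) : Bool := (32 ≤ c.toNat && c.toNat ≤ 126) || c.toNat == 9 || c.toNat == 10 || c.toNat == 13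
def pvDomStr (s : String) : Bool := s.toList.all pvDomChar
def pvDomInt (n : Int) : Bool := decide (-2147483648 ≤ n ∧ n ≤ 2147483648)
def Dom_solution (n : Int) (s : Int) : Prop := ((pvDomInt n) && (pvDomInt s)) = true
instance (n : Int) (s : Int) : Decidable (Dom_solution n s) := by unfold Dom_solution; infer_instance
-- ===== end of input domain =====

-- B replaces div/mod + increment loop + sort by one greedy loop (fresh floor-quotient of the
-- remaining sum each step), which yields the same list already ascending; return value only.

-- ===== PORT A =====
-- 'answer[i] += 1' ported with the total forms pyGetD/pySetD: under Pre_ (n ≠ 0) every visited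
-- index satisfies 0 ≤ i < mod ≤ len(answer), so no IndexError arises and the total forms are exact.
def solution (n : Int) (s : Int) : List Int :=
  if n > s ∧ s = 0 then [-1]
  else
    let div := PySem.Int.floordiv s n
    let md := PySem.Int.mod s n
    let answer := List.replicate n.toNat div
    let answer := (PySem.List.pyRange 0 md 1).foldl
        (fun a i => PySem.List.pySetD a i (PySem.List.pyGetD a i 0 + 1)) answer
    PySem.List.sorted answer (fun x => x) false

-- ===== PORT B =====
-- the loop 'for _ in range(n)' with carried (rem_sum, rem_cnt); append = cons onto recursion
def solGreedy : Nat → Int → Int → List Int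
  | 0, _, _ => []
  | k+1, remSum, remCnt =>
      let val := PySem.Int.floordiv remSum remCnt
      val :: solGreedy k (remSum - val) (remCnt - 1)

def solution_alt (n : Int) (s : Int) : List Int :=
  if n > s ∧ s = 0 then [-1]
  else solGreedy n.toNat s n

-- ===== PRECONDITION & SPEC =====
-- A performs s // n and s % n whenever its guard fails, so n = 0 raises ZeroDivisionError: excluded.
def Pre_solution (n : Int) (s : Int) : Prop := n ≠ 0
instance (n : Int) (s : Int) : Decidable (Pre_solution n s) := by unfold Pre_solution; infer_instance
def pvWitness_solution : Int × Int := (3, 7)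

def Spec_solution (n : Int) (s : Int) (out : List Int) : Prop := out = solution_alt n s
instance (n : Int) (s : Int) (out : List Int) : Decidable (Spec_solution n s out) := by unfold Spec_solution; infer_instance

-- ===== CLAIM (what is proved, stated in full; the proofs are below) =====
def Claim_equal_solution : Prop := ∀ (n : Int) (s : Int), Dom_solution n s → Pre_solution n s → Spec_solution n s (solution n s)

-- ===== LEMMAS AND PROOFS =====

-- A's increment loop on [d]*L turns the first k entries into d+1
lemma incLoop_replicate (L : Nat) (d : Int) (k : Nat) (hk : k ≤ L) :
    (PySem.List.pyRange 0 (k : Int) 1).foldl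
        (fun a i => PySem.List.pySetD a i (PySem.List.pyGetD a i 0 + 1)) (List.replicate L d)
      = List.replicate k (d+1) ++ List.replicate (L - k) d := by
  induction k with
  | zero => simp [PySem.List.pyRange_one_eq_nil]
  | succ k ih =>
    have hstep : PySem.List.pyRange 0 ((k:Int)+1) 1
        = PySem.List.pyRange 0 (k:Int) 1 ++ [(k:Int)] :=
      PySem.List.pyRange_one_succ_right (by positivity)
    push_cast
    rw [hstep, List.foldl_append, ih (by omega)]
    simp only [List.foldl_cons, List.foldl_nil]
    have hget : PySem.List.pyGetD (List.replicate k (d+1) ++ List.replicate (L-k) d) (k:Int) 0 = d := by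
      rw [PySem.List.pyGetD_natCast]
      rw [List.getD_eq_getElem?_getD, List.getElem?_append_right (by simp)]
      simp [show k < L by omega]
    rw [hget, PySem.List.pySetD_natCast]
    have hL : L - k = (L - (k+1)) + 1 := by omega
    rw [hL, List.replicate_succ]
    rw [show k = (List.replicate k (d+1)).length + 0 by simp]
    rw [List.set_append_right _ _ (by simp)]
    simp [List.replicate_succ']

-- B's greedy loop on a decomposed sum produces the ascending split directly
lemma solGreedy_eq (k : Nat) (d m : Int) (hm0 : 0 ≤ m) (hmk : m < (k : Int)) :
    solGreedy k ((k : Int) * d + m) (k : Int)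
      = List.replicate (k - m.toNat) d ++ List.replicate m.toNat (d+1) := by
  induction k generalizing d m with
  | zero => omega
  | succ k ih =>
    have hk1 : (0:Int) < (k:Int) + 1 := by positivity
    have hval : PySem.Int.floordiv (((k:Nat)+1 : Int) * d + m) ((k:Nat)+1 : Int) = d := by
      rw [PySem.Int.floordiv_eq_iff_of_pos (by push_cast; omega)]
      push_cast at hmk
      constructor <;> nlinarith
    simp only [solGreedy]
    push_cast
    rw [hval]
    have harg : ((k:Int)+1) * d + m - d = (k:Int) * d + m := by ring
    have harg2 : ((k:Int)+1) - 1 = (k:Int) := by ring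
    rw [harg, harg2]
    by_cases hm : m < (k:Int)
    · rw [ih d m hm0 hm]
      have h1 : m.toNat ≤ k := by omega
      have : k + 1 - m.toNat = (k - m.toNat) + 1 := by omega
      rw [this, List.replicate_succ, List.cons_append]
    · have hmk' : m = (k:Int) := by omega
      subst hmk'
      rcases Nat.eq_zero_or_pos k with hk0 | hkpos
      · subst hk0
        simp [solGreedy]
      · have harg3 : (k:Int) * d + (k:Int) = (k:Int) * (d+1) + 0 := by ring
        rw [harg3, ih (d+1) 0 le_rfl (by exact_mod_cast hkpos)]
        simp

-- ===== VERDICT (by name: the statement is the Claim_ definition above) =====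
theorem solution_spec : Claim_equal_solution := by
  intro n s _ hpre
  unfold Pre_solution at hpre
  unfold Spec_solution solution solution_alt
  by_cases hg : n > s ∧ s = 0
  · simp only [if_pos hg]
  · simp only [if_neg hg]
    rcases lt_or_gt_of_ne hpre with hn | hn
    · -- n < 0 : both sides are []
      have hnt : n.toNat = 0 := by omega
      have hmle : PySem.Int.mod s n ≤ 0 := (PySem.Int.mod_neg_bounds s hn).2
      rw [PySem.List.pyRange_one_eq_nil hmle]
      simp [hnt, solGreedy, PySem.List.sorted]
    · -- n > 0
      have hm0 : 0 ≤ PySem.Int.mod s n := PySem.Int.mod_nonneg s hn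
      have hmlt : PySem.Int.mod s n < n := PySem.Int.mod_lt s hn
      have hmcast : ((PySem.Int.mod s n).toNat : Int) = PySem.Int.mod s n := Int.toNat_of_nonneg hm0
      have hncast : (n.toNat : Int) = n := Int.toNat_of_nonneg (le_of_lt hn)
      have hs : n * PySem.Int.floordiv s n + PySem.Int.mod s n = s := by
        have := PySem.Int.floordiv_mul_add_mod s n
        linarith
      have hB := solGreedy_eq n.toNat (PySem.Int.floordiv s n) (PySem.Int.mod s n) hm0 (by omega)
      rw [hncast, hs] at hB
      rw [← hmcast, incLoop_replicate n.toNat (PySem.Int.floordiv s n) (PySem.Int.mod s n).toNat (by omega)]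
      rw [hB]
      apply PySem.List.sorted_id_eq_of_perm_of_pairwise
      · exact List.perm_append_comm
      · rw [List.pairwise_append]
        refine ⟨List.pairwise_replicate.2 (by simp), List.pairwise_replicate.2 (by simp), ?_⟩
        intro x hx y hy
        rw [List.eq_of_mem_replicate hx, List.eq_of_mem_replicate hy]
        omega
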